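-- pv_equiv track=rewrite | github.com/nerdneilsfield/CodeWiki | codewiki/src/be/clustering/naming.py | _build_naming_prompt
-- ===== SOURCE A (Python) =====
-- from typing import Any
--
-- def _build_naming_prompt(
--     clusters: list[list[str]],
--     component_file_map: dict[str, str],
--     components: dict[str, Any] | None = None,
-- ) -> str:
--     """Build constrained prompt for LLM naming.
--
--     v3.md L337-338: LLM generates title + description per cluster.
--     LLM does NOT rearrange members.
--     """
--     lines = [
--         "You are naming pre-formed code clusters. Each cluster is already fixed.",
--         "",
--         "CONSTRAINT: Do NOT add, remove, or move components between clusters.",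
--         "You must name every cluster exactly as listed — do not skip any.",
--         "",
--         "For each cluster, provide:",
--         '  - "title": Use format: 中文名 (English Name)',
--         '  - "description": One sentence describing the cluster\'s purpose.',
--         "",
--         "Clusters to name:",
--     ]
--
--     for idx, cluster in enumerate(clusters):
--         lines.append(f"\nCluster {idx}:")
--         # Group members by directory for readability
--         by_dir: dict[str, list[str]] = {}
--         for cid in cluster:
--             file_path = component_file_map.get(cid, "")
--             dir_part = file_path.rsplit("/", 1)[0] if "/" in file_path else "(root)"
--             by_dir.setdefault(dir_part, []).append(cid)
--
--         for dir_path, members in sorted(by_dir.items()):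
--             lines.append(f"  [{dir_path}]")
--             for cid in members:
--                 lines.append(f"    - {cid}")
--
--     lines += [
--         "",
--         "Return ONLY a JSON array with one object per cluster, in this exact schema:",
--         '[{"cluster_idx": 0, "title": "...", "description": "..."}, ...]',
--         "",
--         f"There are {len(clusters)} clusters (indices 0 to {len(clusters) - 1}).",
--         "Return exactly that many objects, no more, no less.",
--     ]
--
--     return "\n".join(lines)
-- ===== SOURCE B (Python) =====
-- from typing import Any
--
--
-- def _build_naming_prompt(
--     clusters: list[list[str]],
--     component_file_map: dict[str, str],
--     components: dict[str, Any] | None = None,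
-- ) -> str:
--     """Same prompt, built without the per-cluster dict-of-lists: sorted distinct
--     directories, then a filter pass per directory (stable, same member order)."""
--
--     def dir_of(cid: str) -> str:
--         fp = component_file_map.get(cid, "")
--         return fp.rsplit("/", 1)[0] if "/" in fp else "(root)"
--
--     header = [
--         "You are naming pre-formed code clusters. Each cluster is already fixed.",
--         "",
--         "CONSTRAINT: Do NOT add, remove, or move components between clusters.",
--         "You must name every cluster exactly as listed — do not skip any.",
--         "",
--         "For each cluster, provide:",
--         '  - "title": Use format: 中文名 (English Name)',
--         '  - "description": One sentence describing the cluster\'s purpose.',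
--         "",
--         "Clusters to name:",
--     ]
--
--     body: list[str] = []
--     for idx, cluster in enumerate(clusters):
--         section = ["\nCluster {}:".format(idx)]
--         for d in sorted({dir_of(cid) for cid in cluster}):
--             section += ["  [{}]".format(d)] + [
--                 "    - {}".format(cid) for cid in cluster if dir_of(cid) == d
--             ]
--         body += section
--
--     footer = [
--         "",
--         "Return ONLY a JSON array with one object per cluster, in this exact schema:",
--         '[{"cluster_idx": 0, "title": "...", "description": "..."}, ...]',
--         "",
--         "There are {} clusters (indices 0 to {}).".format(len(clusters), len(clusters) - 1),
--         "Return exactly that many objects, no more, no less.",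
--     ]
--
--     return "\n".join(header + body + footer)
-- ===== Notes on version B (the rewrite author's own statement) =====
-- stated objective: alternative
-- what changed: Replaces A's per-cluster setdefault dict-of-lists followed by sorting the dict items with sorting the distinct directory names and emitting each directory's members by a stable filter pass over the cluster.
import Mathlib
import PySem

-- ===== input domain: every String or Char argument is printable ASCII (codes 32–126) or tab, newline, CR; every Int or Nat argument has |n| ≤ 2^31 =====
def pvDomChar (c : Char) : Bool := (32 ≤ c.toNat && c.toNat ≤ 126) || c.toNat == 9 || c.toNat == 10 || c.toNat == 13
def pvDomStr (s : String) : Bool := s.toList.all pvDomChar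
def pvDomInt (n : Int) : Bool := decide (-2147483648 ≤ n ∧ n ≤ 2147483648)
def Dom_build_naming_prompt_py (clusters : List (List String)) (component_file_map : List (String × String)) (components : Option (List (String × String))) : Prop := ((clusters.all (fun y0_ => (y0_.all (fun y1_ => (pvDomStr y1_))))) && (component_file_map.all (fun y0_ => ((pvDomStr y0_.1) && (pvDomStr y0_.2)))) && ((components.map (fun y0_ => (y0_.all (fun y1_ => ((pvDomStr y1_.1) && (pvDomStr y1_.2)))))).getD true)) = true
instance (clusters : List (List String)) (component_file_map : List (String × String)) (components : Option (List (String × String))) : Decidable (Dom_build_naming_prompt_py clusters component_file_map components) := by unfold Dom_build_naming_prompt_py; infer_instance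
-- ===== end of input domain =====

-- B rebuilds each cluster section from the sorted distinct directories with a filter pass
-- per directory, instead of A's dict-of-lists indexed by directory; same output.
-- ('components' is accepted and ignored by both programs, as in the Python.)

-- shared helpers: the fixed header/footer lines and the directory extraction,
-- literally identical in both Pythons
def pvHeader : List String :=
  [ "You are naming pre-formed code clusters. Each cluster is already fixed.",
    "",
    "CONSTRAINT: Do NOT add, remove, or move components between clusters.",
    "You must name every cluster exactly as listed — do not skip any.",
    "",
    "For each cluster, provide:",
    "  - \"title\": Use format: 中文名 (English Name)",
    "  - \"description\": One sentence describing the cluster's purpose.",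
    "",
    "Clusters to name:" ]

def pvFooter (n : Int) : List String :=
  [ "",
    "Return ONLY a JSON array with one object per cluster, in this exact schema:",
    "[{\"cluster_idx\": 0, \"title\": \"...\", \"description\": \"...\"}, ...]",
    "",
    "There are " ++ PySem.Int.toStr n ++ " clusters (indices 0 to " ++ PySem.Int.toStr (n - 1) ++ ").",
    "Return exactly that many objects, no more, no less." ]

-- file_path.rsplit("/", 1)[0] if "/" in file_path else "(root)"; the rsplit branch is
-- ported by hand as 'everything before the LAST slash' (exact, since the separator is a
-- single character and the branch only runs when fp contains '/')
def pvDirOf (cfm : PySem.Dict String String) (cid : String) : String :=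
  let fp := cfm.getD cid ""
  if PySem.Str.isIn "/" fp then
    String.ofList ((((fp.toList.reverse).dropWhile (fun c => c != '/')).drop 1).reverse)
  else "(root)"

-- ===== PORT A =====
-- A sorts by_dir.items(): Python compares the (str, list) tuples, but the keys are the
-- distinct dict keys, so the list components are never compared — ported as a sort keyed
-- on the first component (extensionally the same comparison on every reachable input).
def build_naming_prompt_py (clusters : List (List String)) (component_file_map : List (String × String)) (components : Option (List (String × String))) : String :=
  let cfm := PySem.Dict.ofList component_file_map
  let lines :=
    (PySem.List.enumerate clusters).foldl (fun lines p =>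
      let lines := lines ++ ["\nCluster " ++ PySem.Int.toStr p.1 ++ ":"]
      let by_dir := p.2.foldl
        (fun bd cid => bd.modify (pvDirOf cfm cid) [] (fun v => v ++ [cid]))
        PySem.Dict.empty
      (PySem.List.sorted by_dir.items (fun it => it.1)).foldl (fun lines it =>
        it.2.foldl (fun lines cid => lines ++ ["    - " ++ cid])
          (lines ++ ["  [" ++ it.1 ++ "]"])) lines)
      pvHeader
  PySem.Str.join "\n" (lines ++ pvFooter (clusters.length : Int))

-- ===== PORT B =====
def build_naming_prompt_py_alt (clusters : List (List String)) (component_file_map : List (String × String)) (components : Option (List (String × String))) : String :=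
  let cfm := PySem.Dict.ofList component_file_map
  let body :=
    (PySem.List.enumerate clusters).flatMap (fun p =>
      ("\nCluster " ++ PySem.Int.toStr p.1 ++ ":") ::
      (PySem.List.sorted (PySem.Set.ofList (p.2.map (pvDirOf cfm))) (fun x => x)).flatMap
        (fun d =>
          ("  [" ++ d ++ "]") ::
          (p.2.filter (fun cid => pvDirOf cfm cid == d)).map (fun cid => "    - " ++ cid)))
  PySem.Str.join "\n" (pvHeader ++ body ++ pvFooter (clusters.length : Int))

-- ===== PRECONDITION & SPEC =====
def Spec_build_naming_prompt_py (clusters : List (List String)) (component_file_map : List (String × String)) (components : Option (List (String × String))) (out : String) : Prop := out = build_naming_prompt_py_alt clusters component_file_map components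
instance (clusters : List (List String)) (component_file_map : List (String × String)) (components : Option (List (String × String))) (out : String) : Decidable (Spec_build_naming_prompt_py clusters component_file_map components out) := by unfold Spec_build_naming_prompt_py; infer_instance

-- ===== CLAIM (what is proved, stated in full; the proofs are below) =====
def Claim_equal_build_naming_prompt_py : Prop := ∀ (clusters : List (List String)) (component_file_map : List (String × String)) (components : Option (List (String × String))), Dom_build_naming_prompt_py clusters component_file_map components → Spec_build_naming_prompt_py clusters component_file_map components (build_naming_prompt_py clusters component_file_map components)

-- ===== LEMMAS AND PROOFS =====

-- A's sorted dict items ARE B's sorted distinct directories paired with the filter pass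
lemma pv_sorted_items_eq (cfm : PySem.Dict String String) (cluster : List String) :
    PySem.List.sorted
      (cluster.foldl
        (fun bd cid => bd.modify (pvDirOf cfm cid) [] (fun v => v ++ [cid]))
        PySem.Dict.empty).items (fun it => it.1)
    = (PySem.List.sorted (PySem.Set.ofList (cluster.map (pvDirOf cfm))) (fun x => x)).map
        (fun d => (d, cluster.filter (fun cid => pvDirOf cfm cid == d))) := by
  set bd := cluster.foldl
      (fun bd cid => bd.modify (pvDirOf cfm cid) [] (fun v => v ++ [cid]))
      PySem.Dict.empty with hbd
  have hkeys : bd.keys = PySem.Set.ofList (cluster.map (pvDirOf cfm)) := by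
    rw [hbd, PySem.Dict.keys_foldl_modify_key cluster (pvDirOf cfm) [] (fun _ cid v => v ++ [cid]),
      PySem.Dict.keys_empty, PySem.Set.update_nil_left]
  have hnodup : bd.keys.Nodup := by
    rw [hkeys]; exact PySem.Set.nodup_ofList _
  have hgetD : ∀ d : String, bd.getD d [] = cluster.filter (fun cid => pvDirOf cfm cid == d) := by
    intro d
    have h1 : bd = (cluster.map (fun cid => (pvDirOf cfm cid, cid))).foldl
        (fun bd p => bd.modify p.1 [] (fun v => v ++ [p.2])) PySem.Dict.empty := by
      rw [hbd, List.foldl_map]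
    rw [h1, PySem.Dict.getD_foldl_modify_append, PySem.Dict.getD_empty, List.nil_append,
      List.filter_map]
    simp [List.map_map, Function.comp_def]
  have hmapeq : (PySem.List.sorted (PySem.Set.ofList (cluster.map (pvDirOf cfm))) (fun x => x)).map
      (fun d => (d, cluster.filter (fun cid => pvDirOf cfm cid == d)))
    = (PySem.List.sorted (PySem.Set.ofList (cluster.map (pvDirOf cfm))) (fun x => x)).map
      (fun d => (d, bd.getD d [])) := by
    apply List.map_congr_left
    intro d _
    rw [hgetD]
  rw [hmapeq]
  apply PySem.List.sorted_eq_of_perm_of_pairwise_lt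
  · -- B's list is a permutation of the dict items
    have hperm : (PySem.List.sorted (PySem.Set.ofList (cluster.map (pvDirOf cfm)))
        (fun x => x)).Perm bd.keys := by
      rw [hkeys]; exact PySem.List.sorted_perm _ _ _
    have h2 := hperm.map (fun d => (d, bd.getD d []))
    rw [← PySem.Dict.items_eq_map_keys bd hnodup []] at h2
    exact h2
  · -- strictly increasing on the sort key
    exact (List.pairwise_map).2 (PySem.List.sorted_ofList_pairwise_lt (cluster.map (pvDirOf cfm)))

-- A's per-cluster loop body is append-only: it appends exactly B's section
lemma pv_step_eq (cfm : PySem.Dict String String) (lines : List String) (p : Int × List String) :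
    (PySem.List.sorted
        (p.2.foldl (fun bd cid => bd.modify (pvDirOf cfm cid) [] (fun v => v ++ [cid]))
          PySem.Dict.empty).items (fun it => it.1)).foldl
      (fun lines it =>
        it.2.foldl (fun lines cid => lines ++ ["    - " ++ cid])
          (lines ++ ["  [" ++ it.1 ++ "]"]))
      (lines ++ ["\nCluster " ++ PySem.Int.toStr p.1 ++ ":"])
    = lines ++
      (("\nCluster " ++ PySem.Int.toStr p.1 ++ ":") ::
        (PySem.List.sorted (PySem.Set.ofList (p.2.map (pvDirOf cfm))) (fun x => x)).flatMap
          (fun d =>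
            ("  [" ++ d ++ "]") ::
            (p.2.filter (fun cid => pvDirOf cfm cid == d)).map (fun cid => "    - " ++ cid))) := by
  have hinner : ∀ (it : String × List String) (acc : List String),
      it.2.foldl (fun lines cid => lines ++ ["    - " ++ cid]) (acc ++ ["  [" ++ it.1 ++ "]"])
      = acc ++ (("  [" ++ it.1 ++ "]") :: it.2.map (fun cid => "    - " ++ cid)) := by
    intro it acc
    rw [PySem.List.foldl_append_singleton_eq_map]
    simp
  have houter : ∀ (its : List (String × List String)) (acc : List String),
      its.foldl (fun lines it =>
        it.2.foldl (fun lines cid => lines ++ ["    - " ++ cid])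
          (lines ++ ["  [" ++ it.1 ++ "]"])) acc
      = acc ++ its.flatMap (fun it =>
          ("  [" ++ it.1 ++ "]") :: it.2.map (fun cid => "    - " ++ cid)) := by
    intro its
    induction its with
    | nil => intro acc; simp
    | cons h t ih =>
      intro acc
      rw [List.foldl_cons, hinner, ih]; simp
  rw [houter, pv_sorted_items_eq, List.flatMap_map]
  simp

-- ===== VERDICT (by name: the statement is the Claim_ definition above) =====
theorem build_naming_prompt_py_spec : Claim_equal_build_naming_prompt_py := by
  intro clusters component_file_map components _
  unfold Spec_build_naming_prompt_py build_naming_prompt_py build_naming_prompt_py_alt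
  dsimp only
  have : ∀ (l : List (Int × List String)) (acc : List String),
      l.foldl (fun lines p =>
        (PySem.List.sorted
            (p.2.foldl (fun bd cid =>
                bd.modify (pvDirOf (PySem.Dict.ofList component_file_map) cid) [] (fun v => v ++ [cid]))
              PySem.Dict.empty).items (fun it => it.1)).foldl
          (fun lines it =>
            it.2.foldl (fun lines cid => lines ++ ["    - " ++ cid])
              (lines ++ ["  [" ++ it.1 ++ "]"]))
          (lines ++ ["\nCluster " ++ PySem.Int.toStr p.1 ++ ":"])) acc
      = acc ++ l.flatMap (fun p =>
          ("\nCluster " ++ PySem.Int.toStr p.1 ++ ":") ::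
          (PySem.List.sorted (PySem.Set.ofList (p.2.map (pvDirOf (PySem.Dict.ofList component_file_map))))
              (fun x => x)).flatMap
            (fun d =>
              ("  [" ++ d ++ "]") ::
              (p.2.filter (fun cid => pvDirOf (PySem.Dict.ofList component_file_map) cid == d)).map
                (fun cid => "    - " ++ cid))) := by
    intro l
    induction l with
    | nil => intro acc; simp
    | cons h t ih =>
      intro acc
      rw [List.foldl_cons, pv_step_eq, ih]; simp
  rw [this (PySem.List.enumerate clusters) pvHeader]
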